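-- pv_equiv track=rewrite | github.com/Hyojeong721/TIL | SWA/0809/ready2start/연습문제_3/s1.py | get_max_falling
-- ===== SOURCE A (Python) =====
-- def get_max_falling(heights):
--     """
--     상자를 오른쪽으로 90도 회전했을 때 낙차가 가장 큰 상자의 낙차를 구한다.
--     heights: 상자의 높이 배열
--
--     max_height : 현재까지 탐색한 상자 더미의 최대 높이
--     max_falling : 최대 낙차
--     falling: 현재 탐색 중인 상자의 낙차
--     """
--     max_height = 0
--     max_falling = 0
--
--     for i in range(len(heights)):
--         # 왼쪽에 더 높은 상자 더미가 없다면
--         if max_height <= heights[i]: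
--             max_height = heights[i]
--             falling = 0
--
--             for j in range(i + 1, len(heights)):
--                 # 낙차 = 오른쪽에 자신보다 높이가 낮은 상자 더미의 수
--                 if heights[j] < heights[i]:
--                     falling += 1
--
--             if falling > max_falling:
--                 max_falling = falling
--
--     return max_falling
-- ===== SOURCE B (Python) =====
-- def get_max_falling(heights):
--     # One left-to-right pass over a pre-sorted copy: for each new prefix
--     # maximum, a monotone pointer into the sorted array gives the number of
--     # strictly smaller boxes in the whole pile, and subtracting the smaller
--     # boxes already seen on the left yields that box's falling count.
--     srt = sorted(heights)
--     n = len(heights)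
--     best = 0
--     max_h = 0
--     eq = 0  # occurrences of the current maximum among the scanned prefix
--     p = 0   # sorted elements known to be < max_h
--     for i in range(n):
--         h = heights[i]
--         if h >= max_h:
--             if h > max_h:
--                 max_h = h
--                 eq = 1
--             else:
--                 eq += 1
--             while p < n and srt[p] < max_h:
--                 p += 1
--             falling = p - (i + 1 - eq)
--             if falling > best:
--                 best = falling
--     return best
-- ===== Notes on version B (the rewrite author's own statement) =====
-- stated objective: alternative
-- what changed: Replaces A's inner rescans of the suffix (one per prefix maximum) by sorting the list once and advancing a monotone pointer over the sorted copy, deriving each falling count as total-smaller minus smaller-already-seen-on-the-left.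
import Mathlib
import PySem

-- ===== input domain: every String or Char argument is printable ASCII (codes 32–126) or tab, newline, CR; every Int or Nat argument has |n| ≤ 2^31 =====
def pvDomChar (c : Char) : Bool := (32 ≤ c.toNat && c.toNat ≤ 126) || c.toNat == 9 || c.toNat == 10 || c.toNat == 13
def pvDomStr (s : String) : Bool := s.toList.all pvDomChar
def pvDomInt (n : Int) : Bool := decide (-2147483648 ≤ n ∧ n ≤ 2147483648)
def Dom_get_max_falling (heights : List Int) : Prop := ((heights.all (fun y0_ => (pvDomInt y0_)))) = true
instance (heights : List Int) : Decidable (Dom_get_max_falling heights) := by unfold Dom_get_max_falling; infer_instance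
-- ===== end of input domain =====

-- B is an alternative algorithm: instead of A's per-prefix-maximum suffix rescans, it sorts the list once and advances a monotone pointer over the sorted copy; return values proved equal on all inputs.

-- ===== PORT A =====
-- inner loop: for j in range(i+1, len(heights)): if heights[j] < heights[i]: falling += 1
def pvInnerA (heights : List Int) (hi : Int) (j : Nat) (falling : Int) : Int :=
  if j < heights.length then
    pvInnerA heights hi (j + 1)
      (if PySem.List.pyGetD heights (j : Int) 0 < hi then falling + 1 else falling)
  else falling
termination_by heights.length - j

-- outer loop: for i in range(len(heights)) with state (max_height, max_falling)
def pvLoopA (heights : List Int) (i : Nat) (max_h max_f : Int) : Int :=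
  if i < heights.length then
    let hi := PySem.List.pyGetD heights (i : Int) 0
    if max_h ≤ hi then
      let falling := pvInnerA heights hi (i + 1) 0
      pvLoopA heights (i + 1) hi (if max_f < falling then falling else max_f)
    else
      pvLoopA heights (i + 1) max_h max_f
  else max_f
termination_by heights.length - i

def get_max_falling (heights : List Int) : Int :=
  pvLoopA heights 0 0 0

-- ===== PORT B =====
-- while p < n and srt[p] < max_h: p += 1
def pvAdvB (srt : List Int) (p : Nat) (max_h : Int) : Nat :=
  if p < srt.length then
    if PySem.List.pyGetD srt (p : Int) 0 < max_h then pvAdvB srt (p + 1) max_h else p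
  else p
termination_by srt.length - p

-- for i in range(n) with state (best, max_h, eq, p)
def pvLoopB (heights srt : List Int) (i : Nat) (best max_h eq : Int) (p : Nat) : Int :=
  if i < heights.length then
    let h := PySem.List.pyGetD heights (i : Int) 0
    if max_h ≤ h then
      let st := if max_h < h then (h, (1 : Int)) else (max_h, eq + 1)
      let p' := pvAdvB srt p st.1
      let falling := (p' : Int) - ((i : Int) + 1 - st.2)
      pvLoopB heights srt (i + 1) (if best < falling then falling else best) st.1 st.2 p'
    else
      pvLoopB heights srt (i + 1) best max_h eq p
  else best
termination_by heights.length - i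

def get_max_falling_alt (heights : List Int) : Int :=
  pvLoopB heights (PySem.List.sorted heights id false) 0 0 0 0 0

-- ===== PRECONDITION & SPEC =====
def Spec_get_max_falling (heights : List Int) (out : Int) : Prop := out = get_max_falling_alt heights
instance (heights : List Int) (out : Int) : Decidable (Spec_get_max_falling heights out) := by unfold Spec_get_max_falling; infer_instance

-- ===== CLAIM (what is proved, stated in full; the proofs are below) =====
def Claim_equal_get_max_falling : Prop := ∀ (heights : List Int), Dom_get_max_falling heights → Spec_get_max_falling heights (get_max_falling heights)

-- ===== LEMMAS AND PROOFS =====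

lemma pvInnerA_eq (heights : List Int) (hi : Int) :
    ∀ j falling, pvInnerA heights hi j falling
      = falling + ((heights.drop j).countP (fun x => decide (x < hi)) : Int) := by
  have main : ∀ d j falling, heights.length - j = d →
      pvInnerA heights hi j falling
        = falling + ((heights.drop j).countP (fun x => decide (x < hi)) : Int) := by
    intro d
    induction d with
    | zero =>
      intro j falling hd
      have hj : ¬ j < heights.length := by omega
      rw [pvInnerA, if_neg hj, List.drop_eq_nil_of_le (by omega)]
      simp
    | succ n ih =>
      intro j falling hd
      have hj : j < heights.length := by omega
      rw [pvInnerA, if_pos hj, ih (j + 1) _ (by omega),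
        List.drop_eq_getElem_cons hj, List.countP_cons]
      rw [PySem.List.pyGetD_natCast, List.getD_eq_getElem heights 0 hj]
      by_cases h : heights[j] < hi
      · simp only [h, if_pos, decide_true]
        push_cast; ring
      · simp [h]
  intro j falling; exact main _ j falling rfl

lemma pvAdvB_le (srt : List Int) (M : Int) :
    ∀ p, p ≤ srt.length → pvAdvB srt p M ≤ srt.length := by
  have main : ∀ d p, srt.length - p = d → p ≤ srt.length → pvAdvB srt p M ≤ srt.length := by
    intro d
    induction d with
    | zero =>
      intro p hd hp
      rw [pvAdvB, if_neg (by omega)]; exact hp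
    | succ n ih =>
      intro p hd hp
      have hpl : p < srt.length := by omega
      rw [pvAdvB, if_pos hpl]
      split_ifs
      · exact ih (p + 1) (by omega) (by omega)
      · exact hp
  intro p hp; exact main _ p rfl hp

lemma pvAdvB_lt (srt : List Int) (M : Int) :
    ∀ p, (∀ k, k < p → srt.getD k 0 < M) →
      ∀ k, k < pvAdvB srt p M → srt.getD k 0 < M := by
  have main : ∀ d p, srt.length - p = d → (∀ k, k < p → srt.getD k 0 < M) →
      ∀ k, k < pvAdvB srt p M → srt.getD k 0 < M := by
    intro d
    induction d with
    | zero =>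
      intro p hd hinv k hk
      rw [pvAdvB, if_neg (by omega)] at hk
      exact hinv k hk
    | succ n ih =>
      intro p hd hinv k hk
      have hpl : p < srt.length := by omega
      rw [pvAdvB, if_pos hpl] at hk
      split_ifs at hk with hc
      · rw [PySem.List.pyGetD_natCast] at hc
        refine ih (p + 1) (by omega) ?_ k hk
        intro k' hk'
        rcases Nat.lt_succ_iff_lt_or_eq.mp hk' with h | h
        · exact hinv k' h
        · subst h; exact hc
      · exact hinv k hk
  intro p hinv; exact main _ p rfl hinv

lemma pvAdvB_eq (srt : List Int) (M : Int) (hsort : List.Pairwise (· ≤ ·) srt) :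
    ∀ p, p ≤ srt.length → (∀ k, k < p → srt.getD k 0 < M) →
      pvAdvB srt p M = srt.countP (fun x => decide (x < M)) := by
  have mono := List.pairwise_iff_getElem.mp hsort
  have main : ∀ d p, srt.length - p = d → p ≤ srt.length → (∀ k, k < p → srt.getD k 0 < M) →
      pvAdvB srt p M = srt.countP (fun x => decide (x < M)) := by
    intro d
    induction d with
    | zero =>
      intro p hd hp hinv
      have hpe : p = srt.length := by omega
      rw [pvAdvB, if_neg (by omega)]
      subst hpe
      symm
      rw [List.countP_eq_length]
      intro a ha
      rcases List.mem_iff_getElem.mp ha with ⟨k, hk, rfl⟩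
      have := hinv k hk
      rw [List.getD_eq_getElem srt 0 hk] at this
      simpa using this
    | succ n ih =>
      intro p hd hp hinv
      have hpl : p < srt.length := by omega
      rw [pvAdvB, if_pos hpl, PySem.List.pyGetD_natCast, List.getD_eq_getElem srt 0 hpl]
      split_ifs with hc
      · refine ih (p + 1) (by omega) (by omega) ?_
        intro k hk
        rcases Nat.lt_succ_iff_lt_or_eq.mp hk with h | h
        · exact hinv k h
        · subst h; rw [List.getD_eq_getElem srt 0 hpl]; exact hc
      · -- countP = p
        symm
        have hsplit := List.take_append_drop p srt
        calc srt.countP (fun x => decide (x < M))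
            = (srt.take p).countP (fun x => decide (x < M))
              + (srt.drop p).countP (fun x => decide (x < M)) := by
              conv_lhs => rw [← hsplit]
              rw [List.countP_append]
          _ = p + 0 := by
              congr 1
              · have hlt : (List.take p srt).length = p := by
                  rw [List.length_take]; omega
                conv_rhs => rw [← hlt]
                rw [List.countP_eq_length]
                intro a ha
                rcases List.mem_iff_getElem.mp ha with ⟨k, hk, rfl⟩
                have hkp : k < p := by
                  have := hk; rw [List.length_take] at this; omega
                have := hinv k hkp
                rw [List.getD_eq_getElem srt 0 (by omega)] at this
                simpa [List.getElem_take] using this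
              · rw [List.countP_eq_zero]
                intro a ha
                rcases List.mem_iff_getElem.mp ha with ⟨k, hk, rfl⟩
                have hlen : k < srt.length - p := by simpa using hk
                have hge : srt[p] ≤ (srt.drop p)[k] := by
                  rw [List.getElem_drop]
                  rcases Nat.eq_zero_or_pos k with h0 | h0
                  · subst h0; simp
                  · exact mono p (p + k) hpl (by omega) (by omega)
                simp only [decide_eq_true_eq, not_lt] at hc ⊢
                omega
          _ = p := by omega
  intro p hp hinv; exact main _ p rfl hp hinv

lemma pvLoop_eq (hs srt : List Int) (hperm : srt.Perm hs)
    (hsort : List.Pairwise (· ≤ ·) srt) :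
    ∀ i b m eq p, i ≤ hs.length →
      m = (hs.take i).foldl max 0 →
      eq = ((hs.take i).count m : Int) →
      p ≤ srt.length → (∀ k, k < p → srt.getD k 0 < m) →
      pvLoopA hs i m b = pvLoopB hs srt i b m eq p := by
  have main : ∀ d i b m eq p, hs.length - i = d → i ≤ hs.length →
      m = (hs.take i).foldl max 0 →
      eq = ((hs.take i).count m : Int) →
      p ≤ srt.length → (∀ k, k < p → srt.getD k 0 < m) →
      pvLoopA hs i m b = pvLoopB hs srt i b m eq p := by
    intro d
    induction d with
    | zero =>
      intro i b m eq p hd hile hm heq hple hinv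
      rw [pvLoopA, if_neg (by omega), pvLoopB, if_neg (by omega)]
    | succ n ih =>
      intro i b m eq p hd hile hm heq hple hinv
      have hil : i < hs.length := by omega
      have htake : hs.take (i + 1) = hs.take i ++ [hs[i]] := by
        rw [List.take_add_one]
        simp [List.getElem?_eq_getElem hil]
      have hfold : (hs.take (i + 1)).foldl max 0 = max m hs[i] := by
        rw [htake, List.foldl_append, ← hm]; rfl
      have hxle : ∀ x ∈ hs.take i, x ≤ m := by
        intro x hx; rw [hm]; exact (PySem.List.le_foldl_max _ _).2 x hx
      rw [pvLoopA, if_pos hil, pvLoopB, if_pos hil]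
      simp only [PySem.List.pyGetD_natCast, List.getD_eq_getElem hs 0 hil]
      by_cases hsel : m ≤ hs[i]
      · rw [if_pos hsel, if_pos hsel]
        have hinv' : ∀ k, k < p → srt.getD k 0 < hs[i] :=
          fun k hk => lt_of_lt_of_le (hinv k hk) hsel
        have hp' : pvAdvB srt p hs[i] = srt.countP (fun x => decide (x < hs[i])) :=
          pvAdvB_eq srt hs[i] hsort p hple hinv'
        have hple' : pvAdvB srt p hs[i] ≤ srt.length := pvAdvB_le srt hs[i] p hple
        have hlt' : ∀ k, k < pvAdvB srt p hs[i] → srt.getD k 0 < hs[i] :=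
          pvAdvB_lt srt hs[i] p hinv'
        have hsplitP : srt.countP (fun x => decide (x < hs[i]))
            = (hs.take (i + 1)).countP (fun x => decide (x < hs[i]))
              + (hs.drop (i + 1)).countP (fun x => decide (x < hs[i])) := by
          have happ := List.countP_append (p := fun x => decide (x < hs[i]))
            (l₁ := hs.take (i + 1)) (l₂ := hs.drop (i + 1))
          rw [List.take_append_drop] at happ
          rw [hperm.countP_eq, happ]
        have htakeP : (hs.take (i + 1)).countP (fun x => decide (x < hs[i]))
            = (hs.take i).countP (fun x => decide (x < hs[i])) := by
          rw [htake, List.countP_append]; simp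
        have hcP : (hs.take i).countP (fun x => decide (x < hs[i]))
            + (hs.take i).count hs[i] = i := by
          have h1 := List.length_eq_countP_add_countP (fun x => decide (x < hs[i]))
            (l := hs.take i)
          have h2 : (hs.take i).countP
              (fun a => decide ¬ decide (a < hs[i]) = true)
              = (hs.take i).count hs[i] := by
            rw [List.count_eq_countP]
            apply List.countP_congr
            intro x hx
            have hxh : x ≤ hs[i] := le_trans (hxle x hx) hsel
            simp only [decide_eq_true_eq, beq_iff_eq]
            constructor
            · intro hnx; omega
            · intro hxe; omega
          have h3 : (hs.take i).length = i := by rw [List.length_take]; omega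
          omega
        rw [pvInnerA_eq hs hs[i] (i + 1) 0]
        by_cases hm2 : m < hs[i]
        · rw [if_pos hm2]
          have hcz : (hs.take i).count hs[i] = 0 :=
            List.count_eq_zero.mpr (fun hmem => absurd (hxle _ hmem) (not_le.mpr hm2))
          have hfall : (0 : Int) + ((hs.drop (i + 1)).countP (fun x => decide (x < hs[i])) : Int)
              = ((pvAdvB srt p hs[i] : Nat) : Int) - ((i : Int) + 1 - 1) := by
            rw [hp', hsplitP, htakeP]
            have := hcP
            push_cast
            omega
          rw [hfall]
          exact ih (i + 1) _ hs[i] 1 _ (by omega) (by omega)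
            (by rw [hfold, max_eq_right hsel])
            (by rw [htake, List.count_append]
                simp [hcz])
            hple' hlt'
        · have hme : m = hs[i] := le_antisymm hsel (not_lt.mp hm2)
          rw [if_neg hm2]
          rw [← hme] at hp' hsplitP htakeP hcP hinv' hlt' ⊢
          have hfall : (0 : Int) + ((hs.drop (i + 1)).countP (fun x => decide (x < m)) : Int)
              = ((pvAdvB srt p m : Nat) : Int) - ((i : Int) + 1 - (eq + 1)) := by
            rw [hp', hsplitP, htakeP]
            have h4 := hcP
            have h5 : eq = ((hs.take i).count m : Int) := heq
            push_cast
            omega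
          rw [hfall]
          exact ih (i + 1) _ m (eq + 1) _ (by omega) (by omega)
            (by rw [hfold, ← hme, max_self])
            (by rw [htake, ← hme, List.count_append, heq]
                simp [])
            (by rw [← hme] at hple'; exact hple') hlt'
      · rw [if_neg hsel, if_neg hsel]
        have hcne : (hs.take (i + 1)).count m = (hs.take i).count m := by
          rw [htake, List.count_append]
          have : hs[i] ≠ m := ne_of_lt (not_le.mp hsel)
          simp [this]
        exact ih (i + 1) b m eq p (by omega) (by omega)
          (by rw [hfold, max_eq_left (le_of_lt (not_le.mp hsel))])
          (by rw [heq, hcne]) hple hinv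
  intro i b m eq p
  exact main _ i b m eq p rfl

-- ===== VERDICT (by name: the statement is the Claim_ definition above) =====
theorem get_max_falling_spec : Claim_equal_get_max_falling := by
  intro heights _
  unfold Spec_get_max_falling get_max_falling get_max_falling_alt
  exact pvLoop_eq heights _ (PySem.List.sorted_perm heights id false)
    (PySem.List.sorted_pairwise heights id) 0 0 0 0 0 (Nat.zero_le _) rfl rfl (Nat.zero_le _)
    (fun k hk => absurd hk (Nat.not_lt_zero k))
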